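-- pv_equiv track=rewrite | github.com/sanand0/generative-ai-group | whatsapp_analysis.py | first_responder_counts
-- ===== SOURCE A (Python) =====
-- import collections
-- from typing import Callable, Dict, Iterable, List, Sequence, Tuple
--
-- Message = dict
--
-- def first_responder_counts(messages: Sequence[Message]) -> collections.Counter:
--     seen = set()
--     counts: collections.Counter = collections.Counter()
--     for msg in messages:
--         target = msg.get("quote_author")
--         if target and target not in seen:
--             counts[msg["author"]] += 1
--             seen.add(target)
--     return counts
-- ===== SOURCE B (Python) =====
-- import collections
--
--
-- def first_responder_counts(messages):
--     # Brute force: message i is a first response to its quote target iff no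
--     # earlier message quotes the same target (no seen-set, no incremental
--     # counter); the winners are counted in one final Counter pass.
--     winners = []
--     for i, msg in enumerate(messages):
--         t = msg.get("quote_author")
--         if t and all(m.get("quote_author") != t for m in messages[:i]):
--             winners.append(msg["author"])
--     return collections.Counter(winners)
-- ===== Notes on version B (the rewrite author's own statement) =====
-- stated objective: alternative
-- what changed: B drops A's maintained seen-set and incremental Counter entirely: it decides each message's first-responder status by a nested scan over the preceding slice messages[:i], collects the winning authors in a list, and counts them in a single final Counter pass; it trades A's O(n) incremental state for a stateless quadratic scan.
import Mathlib
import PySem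

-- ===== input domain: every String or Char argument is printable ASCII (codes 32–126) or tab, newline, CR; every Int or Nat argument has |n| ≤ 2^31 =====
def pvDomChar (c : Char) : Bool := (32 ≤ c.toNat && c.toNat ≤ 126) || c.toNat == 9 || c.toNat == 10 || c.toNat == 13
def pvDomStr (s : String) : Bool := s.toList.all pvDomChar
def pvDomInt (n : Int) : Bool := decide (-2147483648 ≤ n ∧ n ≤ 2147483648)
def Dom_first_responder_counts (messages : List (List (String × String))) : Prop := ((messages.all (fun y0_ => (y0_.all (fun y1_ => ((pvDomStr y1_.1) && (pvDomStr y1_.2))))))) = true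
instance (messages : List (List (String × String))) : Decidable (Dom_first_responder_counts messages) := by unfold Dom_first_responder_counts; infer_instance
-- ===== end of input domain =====

-- B replaces A's seen-set + incremental Counter with a stateless nested scan over the
-- preceding slice to pick winners, counted by one final Counter pass (alternative, slower).


-- msg.get("quote_author") with None and "" both falsy → merged to ""
def pvT (msg : List (String × String)) : String :=
  ((PySem.Dict.mk msg).get? "quote_author").getD ""
-- msg["author"]; the KeyError case (missing key on a winning message) is excluded by Pre_
def pvAu (msg : List (String × String)) : String :=
  ((PySem.Dict.mk msg).get? "author").getD ""

-- ===== PORT A =====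
-- loop body of A: state = (seen, counts)
def pvStepA (st : PySem.Set String × PySem.Dict String Int) (msg : List (String × String)) :
    PySem.Set String × PySem.Dict String Int :=
  if pvT msg ≠ "" ∧ st.1.contains (pvT msg) = false then
    (st.1.add (pvT msg), st.2.modify (pvAu msg) 0 (· + 1))
  else st

def first_responder_counts (messages : List (List (String × String))) : List (String × Int) :=
  (messages.foldl pvStepA (PySem.Set.empty, PySem.Dict.empty)).2.items

-- ===== PORT B =====
-- loop body of B: winners accumulator; membership decided by scanning messages[:i]
def pvStepB (messages : List (List (String × String))) (ws : List String)
    (p : Int × List (String × String)) : List String :=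
  if pvT p.2 ≠ "" ∧
      (PySem.List.slice messages none (some p.1)).all (fun m => pvT m != pvT p.2) then
    ws ++ [pvAu p.2]
  else ws

def first_responder_counts_alt (messages : List (List (String × String))) : List (String × Int) :=
  (PySem.Dict.counter ((PySem.List.enumerate messages).foldl (pvStepB messages) [])).items

-- ===== PRECONDITION & SPEC =====
-- Pre_ excludes exactly the inputs where the Python raises KeyError: a message whose
-- non-empty quote_author occurs for the first time but which has no "author" key.
def Pre_first_responder_counts (messages : List (List (String × String))) : Prop :=
  ((PySem.List.enumerate messages).all fun p =>
      ((PySem.Dict.mk p.2).contains "author") ||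
      !(pvT p.2 != "" &&
        ((PySem.List.slice messages none (some p.1)).all fun q => pvT q != pvT p.2))) = true
instance (messages : List (List (String × String))) : Decidable (Pre_first_responder_counts messages) := by unfold Pre_first_responder_counts; infer_instance

def pvWitness_first_responder_counts : (List (List (String × String))) :=
  [[("quote_author", "x"), ("author", "a")], [("author", "b")]]

def Spec_first_responder_counts (messages : List (List (String × String))) (out : List (String × Int)) : Prop := out = first_responder_counts_alt messages
instance (messages : List (List (String × String))) (out : List (String × Int)) : Decidable (Spec_first_responder_counts messages out) := by unfold Spec_first_responder_counts; infer_instance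

-- ===== CLAIM (what is proved, stated in full; the proofs are below) =====
def Claim_equal_first_responder_counts : Prop := ∀ (messages : List (List (String × String))), Dom_first_responder_counts messages → Pre_first_responder_counts messages → Spec_first_responder_counts messages (first_responder_counts messages)

-- ===== LEMMAS AND PROOFS =====

-- winners of `rest` given the already-processed prefix `pre`
def pvWins : List (List (String × String)) → List (List (String × String)) → List String
  | _, [] => []
  | pre, m :: rest =>
    (if pvT m ≠ "" ∧ pre.all (fun q => pvT q != pvT m) then [pvAu m] else []) ++
      pvWins (pre ++ [m]) rest

lemma pv_all_bne (pre : List (List (String × String))) (t : String) :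
    pre.all (fun q => pvT q != t) = !(pre.any (fun q => pvT q == t)) := by
  induction pre with
  | nil => rfl
  | cons q l ih =>
    simp only [List.all_cons, List.any_cons, Bool.not_or, ih]
    simp [bne]

-- A's loop, given seen = truthy targets of pre, extends the counter by pvWins pre rest
lemma pvA_loop (rest : List (List (String × String))) :
    ∀ (pre : List (List (String × String))) (seen : PySem.Set String) (ws : List String),
      (∀ x, seen.contains x = (decide (x ≠ "") && pre.any (fun q => pvT q == x))) →
      (rest.foldl pvStepA (seen, PySem.Dict.counter ws)).2 =
        PySem.Dict.counter (ws ++ pvWins pre rest) := by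
  induction rest with
  | nil => intro pre seen ws _; simp [pvWins]
  | cons m rest ih =>
    intro pre seen ws h
    have hc : (pvT m ≠ "" ∧ seen.contains (pvT m) = false) ↔
        (pvT m ≠ "" ∧ pre.all (fun q => pvT q != pvT m) = true) := by
      constructor
      · rintro ⟨ht, hf⟩
        refine ⟨ht, ?_⟩
        rw [h (pvT m)] at hf
        simp [ht] at hf
        simpa using hf
      · rintro ⟨ht, hall⟩
        refine ⟨ht, ?_⟩
        rw [pv_all_bne] at hall
        simp at hall
        rw [h (pvT m)]
        simp
        exact fun _ => hall
    simp only [List.foldl_cons]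
    by_cases hcond : pvT m ≠ "" ∧ seen.contains (pvT m) = false
    · have hcond' := hc.mp hcond
      have hstep : pvStepA (seen, PySem.Dict.counter ws) m =
          (seen.add (pvT m), (PySem.Dict.counter ws).modify (pvAu m) 0 (· + 1)) := by
        simp only [pvStepA, if_pos hcond]
      rw [hstep, ← PySem.Dict.counter_append_singleton]
      have hch : ∀ x, (seen.add (pvT m)).contains x =
          (decide (x ≠ "") && (pre ++ [m]).any (fun q => pvT q == x)) := by
        intro x
        by_cases hx : x = pvT m
        · subst hx
          simp [PySem.Set.contains, PySem.Set.mem_add, hcond.1]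
        · have hthis : (seen.add (pvT m)).contains x = seen.contains x := by
            simp [PySem.Set.contains, PySem.Set.mem_add, hx]
          rw [hthis, h x, List.any_append]
          have hbx : (pvT m == x) = false :=
            beq_eq_false_iff_ne.mpr (fun he => hx he.symm)
          simp [hbx]
      rw [ih (pre ++ [m]) _ _ hch]
      simp [pvWins, hcond'.1, hcond'.2, List.append_assoc]
    · have hstep : pvStepA (seen, PySem.Dict.counter ws) m = (seen, PySem.Dict.counter ws) := by
        simp only [pvStepA, if_neg hcond]
      rw [hstep]
      have hch : ∀ x, seen.contains x =
          (decide (x ≠ "") && (pre ++ [m]).any (fun q => pvT q == x)) := by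
        intro x
        rw [h x, List.any_append]
        by_cases hx : x = pvT m
        · subst hx
          by_cases ht : pvT m = ""
          · simp [ht]
          · have hs : seen.contains (pvT m) = true := by
              cases hb : seen.contains (pvT m) with
              | false => exact absurd ⟨ht, hb⟩ hcond
              | true => rfl
            have hany : pre.any (fun q => pvT q == pvT m) = true := by
              have hx2 := h (pvT m)
              rw [hs] at hx2
              simp [ht] at hx2
              simpa [List.any_eq_true] using hx2
            simp [hany]
        · have hbx : (pvT m == x) = false :=
            beq_eq_false_iff_ne.mpr (fun he => hx he.symm)
          simp [hbx]
      have hw : pvWins pre (m :: rest) = pvWins (pre ++ [m]) rest := by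
        have hnc : ¬ (pvT m ≠ "" ∧ pre.all (fun q => pvT q != pvT m) = true) :=
          fun hh => hcond (hc.mpr hh)
        simp only [pvWins]
        rw [if_neg (by exact_mod_cast hnc)]
        simp
      rw [hw]
      exact ih (pre ++ [m]) seen ws hch

-- B's loop over enumerate, started at index pre.length on the suffix, appends pvWins pre rest
lemma pvB_loop (rest : List (List (String × String))) :
    ∀ (pre : List (List (String × String))) (ws : List String),
      (PySem.List.enumerate rest (pre.length : Int)).foldl (pvStepB (pre ++ rest)) ws =
        ws ++ pvWins pre rest := by
  induction rest with
  | nil => intro pre ws; simp [PySem.List.enumerate_nil, pvWins]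
  | cons m rest ih =>
    intro pre ws
    rw [PySem.List.enumerate_cons, List.foldl_cons]
    have hslice : PySem.List.slice (pre ++ m :: rest) none (some (pre.length : Int)) = pre := by
      rw [PySem.List.slice_to_natCast]
      exact List.take_left
    have hstep : pvStepB (pre ++ m :: rest) ws ((pre.length : Int), m) =
        ws ++ (if pvT m ≠ "" ∧ pre.all (fun q => pvT q != pvT m) then [pvAu m] else []) := by
      simp only [pvStepB, hslice]
      split_ifs with hc1 <;> simp
    rw [hstep]
    have hlen : (pre.length : Int) + 1 = ((pre ++ [m]).length : Int) := by simp
    have happ : pre ++ m :: rest = (pre ++ [m]) ++ rest := by simp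
    rw [hlen, happ, ih (pre ++ [m])]
    simp [pvWins, List.append_assoc]

-- ===== VERDICT (by name: the statement is the Claim_ definition above) =====
theorem first_responder_counts_spec : Claim_equal_first_responder_counts := by
  intro messages _ _
  unfold Spec_first_responder_counts first_responder_counts first_responder_counts_alt
  have hA := pvA_loop messages [] PySem.Set.empty []
    (by intro x; simp [PySem.Set.contains, PySem.Set.empty])
  have h0 : (PySem.Dict.empty : PySem.Dict String Int) = PySem.Dict.counter [] := rfl
  rw [h0, hA]
  have hB := pvB_loop messages [] []
  simp only [List.nil_append, List.length_nil, Nat.cast_zero] at hB ⊢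
  rw [show PySem.List.enumerate messages = PySem.List.enumerate messages 0 from rfl, hB]
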